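-- pv_equiv track=rewrite | github.com/nicperval/LAB-Nombres | src/nombres.py | calcular_nombres
-- ===== SOURCE A (Python) =====
-- def calcular_nombres(lista,genero):
--     conjunto = set()
--     for año,nombre,frecuencia,gen in lista:
--         if genero == gen:
--             conjunto.add(nombre)
--     if len(conjunto) == 0:
--         for año,nombre,frecuencia,gen in lista:
--             conjunto.add(nombre)
--     return conjunto
-- ===== SOURCE B (Python) =====
-- def calcular_nombres(lista, genero):
--     coincidentes, todos = set(), set()
--     for _, nombre, _, gen in lista:
--         todos.add(nombre)
--         if gen == genero:
--             coincidentes.add(nombre)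
--     return coincidentes or todos
-- ===== Notes on version B (the rewrite author's own statement) =====
-- stated objective: alternative
-- what changed: A scans the list in two stages (a targeted loop, then a full fallback rescan when nothing matched); B makes exactly one pass maintaining two accumulators (the matching-name set and the all-names set) and picks between them at the end, so the fallback never rescans the input.
import Mathlib
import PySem

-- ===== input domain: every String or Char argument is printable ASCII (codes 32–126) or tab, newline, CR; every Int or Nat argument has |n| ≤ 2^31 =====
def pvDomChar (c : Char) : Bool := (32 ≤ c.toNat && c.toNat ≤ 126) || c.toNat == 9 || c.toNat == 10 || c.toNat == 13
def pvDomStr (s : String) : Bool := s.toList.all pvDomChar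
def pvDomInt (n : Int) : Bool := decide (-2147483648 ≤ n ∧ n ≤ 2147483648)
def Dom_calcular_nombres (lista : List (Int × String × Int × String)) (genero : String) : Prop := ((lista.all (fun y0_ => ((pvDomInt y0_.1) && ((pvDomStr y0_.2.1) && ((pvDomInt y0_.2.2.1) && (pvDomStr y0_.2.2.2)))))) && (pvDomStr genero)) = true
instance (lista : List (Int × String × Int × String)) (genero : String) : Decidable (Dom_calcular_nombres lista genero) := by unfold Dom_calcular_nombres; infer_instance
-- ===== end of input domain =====

-- B replaces A's two staged scans (targeted loop, then a full fallback rescan) by ONE pass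
-- maintaining two accumulators (matching-name set, all-names set) and a final choice between them.

-- ===== PORT A =====
-- literal transliteration: conjunto built by a conditional add loop, then, if empty,
-- a second loop over lista adding every name into the same set.
def calcular_nombres (lista : List (Int × String × Int × String)) (genero : String) : List String :=
  let conjunto : PySem.Set String :=
    lista.foldl (fun s t => if genero == t.2.2.2 then PySem.Set.add s t.2.1 else s) PySem.Set.empty
  if conjunto.length == 0 then
    lista.foldl (fun s t => PySem.Set.add s t.2.1) conjunto
  else conjunto

-- ===== PORT B =====
-- single pass with a pair accumulator (coincidentes, todos); 'coincidentes or todos' at the end.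
def calcular_nombres_alt (lista : List (Int × String × Int × String)) (genero : String) : List String :=
  let p : PySem.Set String × PySem.Set String :=
    lista.foldl
      (fun (p : PySem.Set String × PySem.Set String) t =>
        (if t.2.2.2 == genero then PySem.Set.add p.1 t.2.1 else p.1,
         PySem.Set.add p.2 t.2.1))
      (PySem.Set.empty, PySem.Set.empty)
  if p.1.isEmpty then p.2 else p.1

-- ===== PRECONDITION & SPEC =====
def Spec_calcular_nombres (lista : List (Int × String × Int × String)) (genero : String) (out : List String) : Prop := out = calcular_nombres_alt lista genero
instance (lista : List (Int × String × Int × String)) (genero : String) (out : List String) : Decidable (Spec_calcular_nombres lista genero out) := by unfold Spec_calcular_nombres; infer_instance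

-- ===== CLAIM (what is proved, stated in full; the proofs are below) =====
def Claim_equal_calcular_nombres : Prop := ∀ (lista : List (Int × String × Int × String)) (genero : String), Dom_calcular_nombres lista genero → Spec_calcular_nombres lista genero (calcular_nombres lista genero)

-- ===== LEMMAS AND PROOFS =====

-- B's fused single-pass fold computes A's two loops componentwise.
theorem fused_eq (genero : String) (lista : List (Int × String × Int × String))
    (a b : PySem.Set String) :
    lista.foldl
      (fun (p : PySem.Set String × PySem.Set String) t =>
        (if t.2.2.2 == genero then PySem.Set.add p.1 t.2.1 else p.1,
         PySem.Set.add p.2 t.2.1)) (a, b)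
      = (lista.foldl (fun s t => if genero == t.2.2.2 then PySem.Set.add s t.2.1 else s) a,
         lista.foldl (fun s t => PySem.Set.add s t.2.1) b) := by
  induction lista generalizing a b with
  | nil => rfl
  | cons hd tl ih =>
    simp only [List.foldl_cons]
    by_cases h : hd.2.2.2 = genero
    · rw [if_pos (by simp [h]), if_pos (by simp [h]), ih]
    · rw [if_neg (by simp [h]), if_neg (by simp [Ne.symm h]), ih]

-- ===== VERDICT (by name: the statement is the Claim_ definition above) =====
theorem calcular_nombres_spec : Claim_equal_calcular_nombres := by
  intro lista genero _
  unfold Spec_calcular_nombres calcular_nombres calcular_nombres_alt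
  rw [fused_eq]
  set c := lista.foldl (fun s t => if genero == t.2.2.2 then PySem.Set.add s t.2.1 else s)
      PySem.Set.empty with hc
  by_cases h : c = []
  · simp [h]
  · have : c.length ≠ 0 := by simpa [List.length_eq_zero_iff] using h
    simp [h, this, List.isEmpty_iff]
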